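-- pv_equiv track=rewrite | github.com/samrao1997/project_euler | pr049.py | gen_comb
-- ===== SOURCE A (Python) =====
-- def gen_comb(list_digits, n):
--
--     if n == 0:
--         return [""]
--
--     l = []
--
--     for i in range(0, len(list_digits)):
--
--         m = str(list_digits[i])
--         rmlst = list_digits[i + 1 :]
--
--         for p in gen_comb(rmlst, n - 1):
--             l.append(m + p)
--     return l
-- ===== SOURCE B (Python) =====
-- def gen_comb(list_digits, n):
--     if n <= 0:
--         return [""] if n == 0 else []
--     if n > len(list_digits):
--         return []
--     rows = [[""]] + [[] for _ in range(n)]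
--     for x in reversed(list_digits):
--         s = str(x)
--         rows = [rows[0]] + [[s + p for p in prev] + cur
--                             for prev, cur in zip(rows, rows[1:])]
--     return rows[n]
-- ===== Notes on version B (the rewrite author's own statement) =====
-- stated objective: alternative
-- what changed: Replaces A's top-down recursion (which re-solves each suffix subproblem once per caller) by a bottom-up dynamic programme: one right-to-left pass maintains, for each k = 0..n, the k-combinations of the current suffix, so every suffix is processed once (plus the natural n > len shortcut).
import Mathlib
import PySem

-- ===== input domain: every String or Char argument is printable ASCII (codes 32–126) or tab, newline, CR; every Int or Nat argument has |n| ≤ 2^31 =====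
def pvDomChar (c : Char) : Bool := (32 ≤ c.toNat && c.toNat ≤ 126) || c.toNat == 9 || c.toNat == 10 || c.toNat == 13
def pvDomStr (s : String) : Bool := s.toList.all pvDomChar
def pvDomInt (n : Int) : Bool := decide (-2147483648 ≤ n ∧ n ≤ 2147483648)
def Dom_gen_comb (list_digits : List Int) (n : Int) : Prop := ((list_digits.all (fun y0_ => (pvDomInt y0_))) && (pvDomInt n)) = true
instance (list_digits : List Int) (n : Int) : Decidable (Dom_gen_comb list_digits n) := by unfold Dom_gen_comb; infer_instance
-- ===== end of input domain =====

-- B replaces A's top-down recursion by a bottom-up DP over suffixes, each suffix processed once (alternative algorithm).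

-- ===== PORT A =====
-- A's for-loop over i visits element list_digits[i] with rmlst = list_digits[i+1:];
-- genCombLoop transcribes that loop by peeling the head at each iteration (same m, rmlst, same append order).
mutual
def gen_comb (list_digits : List Int) (n : Int) : List String :=
  if n = 0 then [""]
  else genCombLoop list_digits n
termination_by (list_digits.length, 1)

def genCombLoop (list_digits : List Int) (n : Int) : List String :=
  match list_digits with
  | [] => []
  | x :: rmlst =>
      ((gen_comb rmlst (n - 1)).map (fun p => PySem.Int.toStr x ++ p)) ++ genCombLoop rmlst n
termination_by (list_digits.length, 0)
end

-- ===== PORT B =====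
-- one DP step: rows[k] (k-combinations of the old suffix) ↦ rows of x :: suffix; zip(rows, rows[1:]) as in Source B
def genCombStep (rows : List (List String)) (x : Int) : List (List String) :=
  rows.headD [] :: List.zipWith (fun prev cur => prev.map (fun p => PySem.Int.toStr x ++ p) ++ cur) rows (rows.drop 1)

def gen_comb_alt (list_digits : List Int) (n : Int) : List String :=
  if n ≤ 0 then (if n = 0 then [""] else [])
  else if (list_digits.length : Int) < n then []
  else
    let rows := list_digits.reverse.foldl genCombStep ([""] :: List.replicate n.toNat [])
    rows.getD n.toNat []

-- ===== PRECONDITION & SPEC =====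
def Spec_gen_comb (list_digits : List Int) (n : Int) (out : List String) : Prop := out = gen_comb_alt list_digits n
instance (list_digits : List Int) (n : Int) (out : List String) : Decidable (Spec_gen_comb list_digits n out) := by unfold Spec_gen_comb; infer_instance

-- ===== CLAIM (what is proved, stated in full; the proofs are below) =====
def Claim_equal_gen_comb : Prop := ∀ (list_digits : List Int) (n : Int), Dom_gen_comb list_digits n → Spec_gen_comb list_digits n (gen_comb list_digits n)

-- ===== LEMMAS AND PROOFS =====

-- proof-only characterisation: C xs k = the k-combinations of xs, in A's order
def combC : List Int → Nat → List String
  | _, 0 => [""]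
  | [], _ + 1 => []
  | x :: r, k + 1 =>
      ((combC r k).map (fun p => PySem.Int.toStr x ++ p)) ++ combC r (k + 1)

lemma genCombLoop_neg : ∀ (xs : List Int) (n : Int), n < 0 → genCombLoop xs n = [] := by
  intro xs
  induction xs with
  | nil => intro n _; simp [genCombLoop]
  | cons x r ih =>
      intro n hn
      have h1 : n - 1 < 0 := by omega
      have h0 : ¬ n - 1 = 0 := by omega
      simp [genCombLoop, gen_comb, h0, ih _ h1, ih _ hn]

lemma gen_comb_neg (xs : List Int) (n : Int) (hn : n < 0) : gen_comb xs n = [] := by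
  have h0 : ¬ n = 0 := by omega
  simp [gen_comb, h0, genCombLoop_neg xs n hn]

lemma genCombLoop_pos : ∀ (xs : List Int) (n : Int), 0 < n → genCombLoop xs n = combC xs n.toNat := by
  intro xs
  induction xs with
  | nil =>
      intro n hn
      obtain ⟨k, hk⟩ : ∃ k, n.toNat = k + 1 := ⟨n.toNat - 1, by omega⟩
      rw [hk]
      simp [genCombLoop, combC]
  | cons x r ih =>
      intro n hn
      have hk : n.toNat = (n - 1).toNat + 1 := by omega
      have hsub : gen_comb r (n - 1) = combC r (n - 1).toNat := by
        by_cases h1 : n - 1 = 0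
        · simp [gen_comb, h1, combC]
        · have : 0 < n - 1 := by omega
          simp [gen_comb, h1, ih _ this]
      rw [genCombLoop, hsub, ih _ hn, hk]
      rfl

lemma gen_comb_pos (xs : List Int) (n : Int) (hn : 0 < n) : gen_comb xs n = combC xs n.toNat := by
  have h0 : ¬ n = 0 := by omega
  simp [gen_comb, h0, genCombLoop_pos xs n hn]

-- zipWith of a map-over-range with its own tail
lemma zipWith_map_range_tail (f : List String → List String → List String) :
    ∀ (m : Nat) (g : Nat → List String),
    List.zipWith f ((List.range (m + 1)).map g) (((List.range (m + 1)).map g).drop 1)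
      = (List.range m).map (fun k => f (g k) (g (k + 1))) := by
  intro m
  induction m with
  | zero => intro g; simp
  | succ m ih =>
      intro g
      have h := ih (fun k => g (k + 1))
      simp only [List.range_succ_eq_map, List.map_cons, List.map_map, List.drop_one,
        List.tail_cons, List.zipWith_cons_cons, Nat.succ_eq_add_one] at h ⊢
      exact congrArg _ h

-- the DP invariant: after the foldr over xs, row k is combC xs k
lemma foldr_step_rows : ∀ (xs : List Int) (m : Nat),
    xs.foldr (fun x rows => genCombStep rows x) ([""] :: List.replicate m [])
      = (List.range (m + 1)).map (fun k => combC xs k) := by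
  intro xs
  induction xs with
  | nil =>
      intro m
      rw [List.range_succ_eq_map]
      simp only [List.foldr_nil, List.map_cons, List.map_map]
      have : (List.range m).map ((fun k => combC ([] : List Int) k) ∘ Nat.succ)
           = (List.range m).map (fun _ => ([] : List String)) := by
        apply List.map_congr_left; intro a _; rfl
      rw [this, List.map_const']
      simp [combC]
  | cons x r ih =>
      intro m
      rw [List.foldr_cons, ih m]
      simp only [genCombStep]
      rw [zipWith_map_range_tail]
      have hhead : ((List.range (m + 1)).map (fun k => combC r k)).headD [] = [""] := by
        rw [List.range_succ_eq_map]; simp [combC]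
      rw [hhead, List.range_succ_eq_map (n := m)]
      simp only [List.map_cons, List.map_map]
      congr 1

lemma combC_eq_nil_of_lt : ∀ (xs : List Int) (k : Nat), xs.length < k → combC xs k = [] := by
  intro xs
  induction xs with
  | nil => intro k hk; obtain ⟨j, rfl⟩ : ∃ j, k = j + 1 := ⟨k - 1, by omega⟩; rfl
  | cons x r ih =>
      intro k hk
      obtain ⟨j, rfl⟩ : ∃ j, k = j + 1 := ⟨k - 1, by omega⟩
      simp only [List.length_cons] at hk
      simp [combC, ih j (by omega), ih (j + 1) (by omega)]

lemma getD_map_range (g : Nat → List String) (m : Nat) :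
    ((List.range (m + 1)).map g).getD m [] = g m := by
  have hm : m < ((List.range (m + 1)).map g).length := by simp
  rw [List.getD_eq_getElem _ _ hm]
  simp

-- ===== VERDICT (by name: the statement is the Claim_ definition above) =====
theorem gen_comb_spec : Claim_equal_gen_comb := by
  intro xs n _
  unfold Spec_gen_comb gen_comb_alt
  by_cases hle : n ≤ 0
  · by_cases h0 : n = 0
    · simp [gen_comb, h0]
    · have hneg : n < 0 := by omega
      simp [hle, h0, gen_comb_neg xs n hneg]
  · have hpos : 0 < n := by omega
    by_cases hbig : (xs.length : Int) < n
    · have : xs.length < n.toNat := by omega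
      simp [hle, hbig, gen_comb_pos xs n hpos, combC_eq_nil_of_lt xs n.toNat this]
    · simp only [hle, hbig, if_false]
      rw [List.foldl_reverse, foldr_step_rows xs n.toNat, getD_map_range,
        gen_comb_pos xs n hpos]
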